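-- pv_equiv track=rewrite | github.com/AlexShao1116/KATTIS_Project | problemskeleton/submissions/accepted/solution_correct.py | count_sort_inverse
-- ===== SOURCE A (Python) =====
-- def count_sort_inverse(serial_numbers):
--     if not serial_numbers:
--         return []
--
--     n = len(serial_numbers)
--     max_serial = max(serial_numbers)
--
--     # freq of each
--     freqArr = [0] * (max_serial + 1)
--
--     # get freq of each element
--     for serial in serial_numbers:
--         freqArr[serial] += 1
--
--     # (special part for this question) compute sum backwards
--     # freqArr[x] = nb of elements >= x
--     for i in range(max_serial - 1, -1, -1):
--         freqArr[i] += freqArr[i + 1]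
--
--
--     # build sorted array
--     sorted_serials = [0] * n
--
--     # stable: iterate backwards
--     for i in range(n - 1, -1, -1):
--         serial = serial_numbers[i]
--         sorted_serials[freqArr[serial] - 1] = serial
--         freqArr[serial] -= 1
--
--     return sorted_serials#[::-1]
-- ===== SOURCE B (Python) =====
-- def count_sort_inverse(serial_numbers):
--     if not serial_numbers:
--         return []
--
--     max_serial = max(serial_numbers)
--
--     # frequency of each serial
--     freq = [0] * (max_serial + 1)
--     for serial in serial_numbers:
--         freq[serial] += 1
--
--     # emit each value directly, from the largest down to 0
--     result = []
--     for x in range(max_serial, -1, -1):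
--         result.extend([x] * freq[x])
--     return result
-- ===== Notes on version B (the rewrite author's own statement) =====
-- stated objective: simpler
-- what changed: B keeps the frequency count but replaces A's cumulative-suffix-sum pass and stable backward index-placement pass with a single descending emission loop that appends each value freq[x] times.
-- outside the precondition, e.g. on count_sort_inverse([4109, 2, -1, -1, -1]): A returns [4109, -1, -1, -1, 2], B returns [4109, 4109, 4109, 4109, 2]; on count_sort_inverse([-1]): A raises IndexError, B raises IndexError
import Mathlib
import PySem

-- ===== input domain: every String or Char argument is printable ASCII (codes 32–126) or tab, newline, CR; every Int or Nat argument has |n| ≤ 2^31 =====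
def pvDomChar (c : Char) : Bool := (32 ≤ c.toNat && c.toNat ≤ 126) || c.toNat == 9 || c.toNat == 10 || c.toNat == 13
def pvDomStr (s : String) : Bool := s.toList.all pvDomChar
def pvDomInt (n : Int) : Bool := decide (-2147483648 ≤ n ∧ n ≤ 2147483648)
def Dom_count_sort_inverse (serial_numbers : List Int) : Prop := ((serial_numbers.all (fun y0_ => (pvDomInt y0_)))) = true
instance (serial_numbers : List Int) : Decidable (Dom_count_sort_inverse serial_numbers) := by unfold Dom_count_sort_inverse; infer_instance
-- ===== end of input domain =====

-- B keeps A's frequency count but replaces A's cumulative-suffix-sum pass and stable backward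
-- index-placement loop with a single descending emission loop; objective: simpler.

-- ===== PORT A =====
-- Python's list indexing a[i] / a[i] = v, on an Array for O(1) access: a negative index counts
-- from the end; an out-of-range read yields the default and an out-of-range write is dropped
-- (Python raises there; Pre_ keeps every use in range, so nothing is claimed about that case).
def pyAIdx (a : Array Int) (i : Int) : Int := if i < 0 then i + a.size else i
def pyAGetD (a : Array Int) (i : Int) (d : Int) : Int :=
  if pyAIdx a i < 0 then d else a.getD (pyAIdx a i).toNat d
def pyASetD (a : Array Int) (i : Int) (v : Int) : Array Int :=
  if pyAIdx a i < 0 then a else a.setIfInBounds (pyAIdx a i).toNat v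

def count_sort_inverse (serial_numbers : List Int) : List Int :=
  if serial_numbers = [] then []
  else
    let n : Int := PySem.List.len serial_numbers
    -- max(serial_numbers): the list is nonempty here, so max? = some and the default is never used
    let max_serial : Int := (PySem.List.max? serial_numbers (fun x => x)).getD 0
    let freqArr : Array Int := Array.replicate (max_serial + 1).toNat 0
    -- get freq of each element
    let freqArr := serial_numbers.foldl
      (fun f serial => pyASetD f serial (pyAGetD f serial 0 + 1)) freqArr
    -- compute sum backwards: freqArr[x] = nb of elements >= x
    let freqArr := (PySem.List.pyRange (max_serial - 1) (-1) (-1)).foldl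
      (fun f i => pyASetD f i (pyAGetD f i 0 + pyAGetD f (i + 1) 0)) freqArr
    let sorted_serials : Array Int := Array.replicate n.toNat 0
    -- stable: iterate backwards
    let res := (PySem.List.pyRange (n - 1) (-1) (-1)).foldl
      (fun (st : Array Int × Array Int) i =>
        let serial := PySem.List.pyGetD serial_numbers i 0
        (pyASetD st.1 (pyAGetD st.2 serial 0 - 1) serial,
         pyASetD st.2 serial (pyAGetD st.2 serial 0 - 1)))
      (sorted_serials, freqArr)
    res.1.toList

-- ===== PORT B =====
def count_sort_inverse_alt (serial_numbers : List Int) : List Int :=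
  if serial_numbers = [] then []
  else
    let max_serial : Int := (PySem.List.max? serial_numbers (fun x => x)).getD 0
    let freq : Array Int := Array.replicate (max_serial + 1).toNat 0
    let freq := serial_numbers.foldl
      (fun f serial => pyASetD f serial (pyAGetD f serial 0 + 1)) freq
    (PySem.List.pyRange max_serial (-1) (-1)).foldl
      (fun result x => result ++ List.replicate (pyAGetD freq x 0).toNat x) []

-- ===== PRECONDITION & SPEC =====
-- Pre_ excludes lists containing a negative serial (outside the natural domain of serial numbers):
-- there Python's negative-index wraparound makes A raise IndexError on some such inputs and return
-- an unsorted wraparound artefact on the others.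
def Pre_count_sort_inverse (serial_numbers : List Int) : Prop :=
  (serial_numbers.all (fun x => decide (0 ≤ x))) = true
instance (serial_numbers : List Int) : Decidable (Pre_count_sort_inverse serial_numbers) := by
  unfold Pre_count_sort_inverse; infer_instance

def pvWitness_count_sort_inverse : List Int := [3, 1, 2, 3, 0]

def Spec_count_sort_inverse (serial_numbers : List Int) (out : List Int) : Prop :=
  out = count_sort_inverse_alt serial_numbers
instance (serial_numbers : List Int) (out : List Int) : Decidable (Spec_count_sort_inverse serial_numbers out) := by
  unfold Spec_count_sort_inverse; infer_instance

-- ===== CLAIM =====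
def Claim_equal_count_sort_inverse : Prop :=
  ∀ (serial_numbers : List Int), Dom_count_sort_inverse serial_numbers →
    Pre_count_sort_inverse serial_numbers →
    Spec_count_sort_inverse serial_numbers (count_sort_inverse serial_numbers)

-- ===== LEMMAS AND PROOFS =====

theorem pv_agetD_of_nonneg (a : Array Int) (i : Int) (d : Int) (h : 0 ≤ i) :
    pyAGetD a i d = a.getD i.toNat d := by
  simp [pyAGetD, pyAIdx, not_lt.mpr h, h]

theorem pv_agetD_natCast (a : Array Int) (u : Nat) (d : Int) :
    pyAGetD a ((u : Nat) : Int) d = a.getD u d := by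
  rw [pv_agetD_of_nonneg a _ d (by positivity), Int.toNat_natCast]

theorem pv_asetD_of_nonneg (a : Array Int) (i : Int) (v : Int) (h : 0 ≤ i) :
    pyASetD a i v = a.setIfInBounds i.toNat v := by
  simp [pyASetD, pyAIdx, not_lt.mpr h, h]

theorem pv_aget_eq (a : Array Int) (u : Nat) (d : Int) (h : u < a.size) : a.getD u d = a[u] :=
  (Array.getElem_eq_getD d).symm

theorem pv_aset_getD (a : Array Int) (iN : Nat) (w : Int) (u : Nat) (hu : u < a.size) :
    (a.setIfInBounds iN w).getD u 0 = if iN = u then w else a.getD u 0 := by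
  rw [pv_aget_eq _ u 0 (by rw [Array.size_setIfInBounds]; exact hu),
    pv_aget_eq a u 0 hu]
  exact Array.getElem_setIfInBounds hu

theorem pv_asetD_size (a : Array Int) (i : Int) (v : Int) : (pyASetD a i v).size = a.size := by
  simp only [pyASetD]
  split_ifs <;> simp

theorem pv_arep_getD (n : Nat) (u : Nat) (hu : u < n) :
    (Array.replicate n (0 : Int)).getD u 0 = 0 := by
  rw [pv_aget_eq _ u 0 (by rw [Array.size_replicate]; exact hu)]
  exact Array.getElem_replicate _

def pvGe (xs : List Int) (v : Int) : Nat := xs.countP (fun x => decide (v ≤ x))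
def pvGt (xs : List Int) (v : Int) : Nat := xs.countP (fun x => decide (v < x))

def pvStep1 : Array Int → Int → Array Int :=
  fun f serial => pyASetD f serial (pyAGetD f serial 0 + 1)
def pvStep2 : Array Int → Int → Array Int :=
  fun f i => pyASetD f i (pyAGetD f i 0 + pyAGetD f (i + 1) 0)
def pvStep3 (xs : List Int) : (Array Int × Array Int) → Int → (Array Int × Array Int) :=
  fun st i =>
    let serial := PySem.List.pyGetD xs i 0
    (pyASetD st.1 (pyAGetD st.2 serial 0 - 1) serial,
     pyASetD st.2 serial (pyAGetD st.2 serial 0 - 1))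

theorem pv_foldl1_length (l : List Int) : ∀ (f : Array Int), (l.foldl pvStep1 f).size = f.size := by
  induction l with
  | nil => intro f; rfl
  | cons x t ih =>
    intro f
    simp only [List.foldl_cons]
    rw [ih]
    simp [pvStep1, pv_asetD_size]

theorem pv_foldl2_length (l : List Int) : ∀ (f : Array Int), (l.foldl pvStep2 f).size = f.size := by
  induction l with
  | nil => intro f; rfl
  | cons x t ih =>
    intro f
    simp only [List.foldl_cons]
    rw [ih]
    simp [pvStep2, pv_asetD_size]

theorem pv_foldl3_length (xs l : List Int) : ∀ (st : Array Int × Array Int),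
    (l.foldl (pvStep3 xs) st).1.size = st.1.size ∧ (l.foldl (pvStep3 xs) st).2.size = st.2.size := by
  induction l with
  | nil => intro st; exact ⟨rfl, rfl⟩
  | cons x t ih =>
    intro st
    simp only [List.foldl_cons]
    refine ⟨((ih _).1).trans ?_, ((ih _).2).trans ?_⟩ <;>
      simp [pvStep3, pv_asetD_size]

theorem pv_freq_getD (xs : List Int) : ∀ (f : Array Int),
    (∀ x ∈ xs, 0 ≤ x ∧ x < (f.size : Int)) → ∀ j : Nat, j < f.size →
    (xs.foldl pvStep1 f).getD j 0 = f.getD j 0 + (xs.count (j : Int) : Int) := by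
  induction xs with
  | nil => intro f _ j hj; simp
  | cons x t ih =>
    intro f h j hj
    obtain ⟨hx0, hxlt⟩ := h x (by simp)
    have hset : pvStep1 f x = f.setIfInBounds x.toNat (f.getD x.toNat 0 + 1) := by
      simp only [pvStep1]
      rw [pv_asetD_of_nonneg _ _ _ hx0, pv_agetD_of_nonneg _ _ _ hx0]
    have hlen : (pvStep1 f x).size = f.size := by rw [hset]; simp
    simp only [List.foldl_cons]
    rw [ih (pvStep1 f x) (by rw [hlen]; intro y hy; exact h y (by simp [hy])) j (by omega)]
    have hget : (pvStep1 f x).getD j 0 = if x.toNat = j then f.getD j 0 + 1 else f.getD j 0 := by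
      rw [hset, pv_aset_getD f x.toNat _ j hj]
      split_ifs with hij
      · rw [hij, pv_aget_eq f j 0 hj]
        rfl
      · rfl
    rw [hget, List.count_cons]
    have heq : (x == (j : Int)) = decide (x.toNat = j) := by
      by_cases hx : x = (j : Int)
      · have : x.toNat = j := by omega
        simp [hx, this]
      · have : x.toNat ≠ j := by omega
        simp [hx, this]
    rw [heq]
    by_cases hxj : x.toNat = j <;> simp [hget, hxj] <;> push_cast <;> ring

theorem pv_sum_indicator (x v : Int) : ∀ (L : Nat),
    (∑ t ∈ Finset.range L, if x = v + (t : Int) then (1 : Int) else 0) =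
      if v ≤ x ∧ x < v + L then 1 else 0 := by
  intro L
  induction L with
  | zero =>
    rw [Finset.range_zero, Finset.sum_empty, if_neg (by push_cast; omega)]
  | succ L ih =>
    rw [Finset.sum_range_succ, ih]
    split_ifs <;> push_cast at * <;> omega

theorem pv_step2_set (f : Array Int) (a : Nat) :
    pvStep2 f ((a : Nat) : Int) = f.setIfInBounds a (f.getD a 0 + f.getD (a + 1) 0) := by
  simp only [pvStep2]
  rw [show (((a : Nat) : Int) + 1) = (((a + 1 : Nat)) : Int) by push_cast; ring]
  rw [pv_agetD_natCast, pv_agetD_natCast, pv_asetD_of_nonneg _ _ _ (by positivity),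
    Int.toNat_natCast]

theorem pv_suffix_getD : ∀ (k : Nat) (f : Array Int), k + 1 < f.size → ∀ j : Nat, j < f.size →
    ((PySem.List.pyRange (k : Int) (-1) (-1)).foldl pvStep2 f).getD j 0 =
      if j ≤ k then ∑ t ∈ Finset.range (k + 2 - j), f.getD (j + t) 0 else f.getD j 0 := by
  intro k
  induction k with
  | zero =>
    intro f hf j hj
    rw [PySem.List.pyRange_neg_one_cons (by omega), PySem.List.pyRange_neg_one_eq_nil (by omega)]
    simp only [List.foldl_cons, List.foldl_nil]
    rw [pv_step2_set f 0]
    by_cases hj0 : j = 0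
    · subst hj0
      rw [pv_aset_getD f 0 _ 0 hj, if_pos rfl, if_pos (Nat.le_refl 0)]
      rw [Finset.sum_range_succ, Finset.sum_range_succ, Finset.sum_range_zero]
      simp
    · rw [pv_aset_getD f 0 _ j hj, if_neg (by omega), if_neg (by omega)]
  | succ k ih =>
    intro f hf j hj
    rw [PySem.List.pyRange_neg_one_cons (by omega)]
    have hcast : ((k + 1 : Nat) : Int) - 1 = ((k : Nat) : Int) := by push_cast; ring
    rw [List.foldl_cons, hcast, pv_step2_set f (k + 1)]
    set g : Array Int := f.setIfInBounds (k + 1) (f.getD (k + 1) 0 + f.getD (k + 1 + 1) 0) with hg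
    have hlen : g.size = f.size := by rw [hg, Array.size_setIfInBounds]
    rw [ih g (by omega) j (by omega)]
    have hget : ∀ u : Nat, u < f.size →
        g.getD u 0 = if k + 1 = u then f.getD (k + 1) 0 + f.getD (k + 2) 0 else f.getD u 0 := by
      intro u hu
      rw [hg, pv_aset_getD f (k + 1) _ u hu]
    by_cases hjk : j ≤ k
    · rw [if_pos hjk, if_pos (by omega)]
      have hL : k + 2 - j = (k + 1 - j) + 1 := by omega
      have hL2 : (k + 1) + 2 - j = (k + 1 - j) + 1 + 1 := by omega
      rw [hL, hL2, Finset.sum_range_succ, Finset.sum_range_succ, Finset.sum_range_succ]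
      have hmid : ∀ t ∈ Finset.range (k + 1 - j), g.getD (j + t) 0 = f.getD (j + t) 0 := by
        intro t ht
        simp only [Finset.mem_range] at ht
        rw [hget (j + t) (by omega), if_neg (by omega)]
      rw [Finset.sum_congr rfl hmid]
      have hlast : j + (k + 1 - j) = k + 1 := by omega
      have hlast2 : j + (k + 1 - j + 1) = k + 2 := by omega
      rw [hlast, hlast2, hget (k + 1) (by omega), if_pos rfl]
      ring
    · rw [if_neg hjk]
      by_cases hja : j = k + 1
      · rw [if_pos (by omega), hja]
        rw [hget (k + 1) (by omega), if_pos rfl]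
        have : (k + 1) + 2 - (k + 1) = 2 := by omega
        rw [this, Finset.sum_range_succ, Finset.sum_range_succ, Finset.sum_range_zero]
        have e1 : k + 1 + 0 = k + 1 := by omega
        have e2 : k + 1 + 1 = k + 2 := by omega
        rw [e1, e2]
        ring
      · rw [if_neg (by omega), hget j (by omega), if_neg (by omega)]

theorem pv_sum_counts (mN : Nat) : ∀ (xs : List Int),
    (∀ x ∈ xs, 0 ≤ x ∧ x ≤ (mN : Int)) → ∀ v : Nat, v ≤ mN →
    (∑ t ∈ Finset.range (mN + 1 - v), (xs.count ((v : Int) + (t : Int)) : Int)) =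
      (pvGe xs ((v : Nat) : Int) : Int) := by
  intro xs
  induction xs with
  | nil => intro _ v hv; simp [pvGe]
  | cons x t ih =>
    intro h v hv
    obtain ⟨hx0, hxm⟩ := h x (by simp)
    have hsum : ∀ u : Int, List.count u (x :: t) = List.count u t + if x == u then 1 else 0 :=
      fun u => List.count_cons
    have hs : (∑ tt ∈ Finset.range (mN + 1 - v), (List.count ((v : Int) + (tt : Int)) (x :: t) : Int)) =
        (∑ tt ∈ Finset.range (mN + 1 - v), (List.count ((v : Int) + (tt : Int)) t : Int)) +
        (∑ tt ∈ Finset.range (mN + 1 - v), if x = (v : Int) + (tt : Int) then (1 : Int) else 0) := by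
      rw [← Finset.sum_add_distrib]
      refine Finset.sum_congr rfl ?_
      intro u _
      rw [hsum]
      push_cast
      by_cases hxe : x = (v : Int) + (u : Int) <;> simp [hxe]
    rw [hs, ih (fun y hy => h y (by simp [hy])) v hv, pv_sum_indicator]
    simp only [pvGe, List.countP_cons]
    have hc : ((v : Int) ≤ x ∧ x < (v : Int) + ((mN + 1 - v : Nat) : Int)) ↔ ((v : Int) ≤ x) := by
      constructor
      · exact fun hh => hh.1
      · intro hh
        refine ⟨hh, ?_⟩
        push_cast
        omega
    by_cases hvx : (v : Int) ≤ x
    · rw [if_pos (hc.mpr hvx)]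
      simp [hvx]
      try omega
    · rw [if_neg (fun hh => hvx (hc.mp hh))]
      simp [hvx]
      try omega

theorem pv_ge_eq_gt_add_count (xs : List Int) (v : Int) :
    pvGe xs v = pvGt xs v + xs.count v := by
  induction xs with
  | nil => simp [pvGe, pvGt]
  | cons x t ih =>
    simp only [pvGe, pvGt, List.countP_cons, List.count_cons, beq_iff_eq,
      decide_eq_true_eq] at ih ⊢
    split_ifs <;> omega

theorem pv_block_unique (xs : List Int) (v w : Int) (j : Nat)
    (h1 : pvGt xs v ≤ j) (h2 : j < pvGe xs v) (h3 : pvGt xs w ≤ j) (h4 : j < pvGe xs w) :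
    v = w := by
  rcases lt_trichotomy v w with h | h | h
  · exfalso
    have : pvGe xs w ≤ pvGt xs v :=
      List.countP_mono_left (fun x _ hx => by simp at *; omega)
    omega
  · exact h
  · exfalso
    have : pvGe xs v ≤ pvGt xs w :=
      List.countP_mono_left (fun x _ hx => by simp at *; omega)
    omega

theorem pv_countP_succ (p : Int → Bool) (k : Int) (hp : p (k + 1) = true) : ∀ (xs : List Int),
    xs.countP (fun x => p x && decide (x ≤ k + 1)) =
      xs.count (k + 1) + xs.countP (fun x => p x && decide (x ≤ k)) := by
  intro xs
  induction xs with
  | nil => simp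
  | cons x t ih =>
    simp only [List.countP_cons, List.count_cons, ih]
    by_cases hx : x = k + 1
    · simp [hx, hp]; omega
    · by_cases hle : x ≤ k
      · have h1 : x ≤ k + 1 := by omega
        have hne : ¬ (x == k + 1) = true := by simp; omega
        simp [hle, h1, hne]
        by_cases hpx : p x = true <;> simp [hpx] <;> omega
      · have h1 : ¬ x ≤ k + 1 := by omega
        have hne : ¬ (x == k + 1) = true := by simp; omega
        simp [hle, h1, hne]

def pvOut (xs : List Int) (k : Int) : List Int :=
  (PySem.List.pyRange k (-1) (-1)).flatMap (fun v => List.replicate (xs.count v) v)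

theorem pv_out_zero (xs : List Int) : pvOut xs ((0 : Nat) : Int) = List.replicate (xs.count 0) 0 := by
  simp only [pvOut]
  rw [PySem.List.pyRange_neg_one_cons (by omega), PySem.List.pyRange_neg_one_eq_nil (by omega)]
  simp

theorem pv_out_succ (xs : List Int) (k : Nat) :
    pvOut xs ((k + 1 : Nat) : Int) =
      List.replicate (xs.count ((k : Int) + 1)) ((k : Int) + 1) ++ pvOut xs (k : Int) := by
  simp only [pvOut]
  rw [PySem.List.pyRange_neg_one_cons (by push_cast; omega)]
  rw [List.flatMap_cons]
  have h1 : ((k + 1 : Nat) : Int) = (k : Int) + 1 := by push_cast; ring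
  rw [h1, show ((k : Int) + 1 - 1) = (k : Int) by ring]

theorem pv_out_length (xs : List Int) : ∀ (k : Nat),
    (pvOut xs (k : Int)).length = xs.countP (fun x => decide (0 ≤ x) && decide (x ≤ (k : Int))) := by
  intro k
  induction k with
  | zero =>
    rw [pv_out_zero, List.length_replicate]
    rw [List.count_eq_countP]
    refine List.countP_congr ?_
    intro x _
    simp only [beq_iff_eq, Bool.and_eq_true, decide_eq_true_eq]
    omega
  | succ k ih =>
    rw [pv_out_succ, List.length_append, List.length_replicate, ih]
    have := pv_countP_succ (fun x => decide (0 ≤ x)) (k : Int) (by simp; positivity) xs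
    rw [show ((k + 1 : Nat) : Int) = (k : Int) + 1 by push_cast; ring, this]

theorem pv_out_bounds (xs : List Int) : ∀ (k : Nat) (j : Nat), j < (pvOut xs (k : Int)).length →
    0 ≤ (pvOut xs (k : Int)).getD j 0 ∧ (pvOut xs (k : Int)).getD j 0 ≤ (k : Int) ∧
    xs.countP (fun x => decide ((pvOut xs (k : Int)).getD j 0 < x) && decide (x ≤ (k : Int))) ≤ j ∧
    j < xs.countP (fun x => decide ((pvOut xs (k : Int)).getD j 0 ≤ x) && decide (x ≤ (k : Int))) := by
  intro k
  induction k with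
  | zero =>
    intro j hj
    rw [pv_out_zero] at hj ⊢
    rw [List.length_replicate] at hj
    rw [List.getD_eq_getElem _ 0 (by simpa using hj), List.getElem_replicate]
    refine ⟨le_refl 0, by norm_num, ?_, ?_⟩
    · have : xs.countP (fun x => decide ((0 : Int) < x) && decide (x ≤ ((0 : Nat) : Int))) = 0 := by
        rw [List.countP_eq_zero]
        intro x _
        simp only [Bool.and_eq_true, decide_eq_true_eq, not_and]
        intro h1 h2
        omega
      omega
    · have : xs.countP (fun x => decide ((0 : Int) ≤ x) && decide (x ≤ ((0 : Nat) : Int))) = xs.count 0 := by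
        rw [List.count_eq_countP]
        refine List.countP_congr ?_
        intro x _
        simp only [beq_iff_eq, Bool.and_eq_true, decide_eq_true_eq]
        omega
      rw [this]
      exact hj
  | succ k ih =>
    intro j hj
    rw [pv_out_succ] at hj ⊢
    rw [List.length_append, List.length_replicate] at hj
    by_cases hjc : j < xs.count ((k : Int) + 1)
    · rw [List.getD_append _ _ _ _ (by simpa using hjc)]
      rw [List.getD_eq_getElem _ 0 (by simpa using hjc), List.getElem_replicate]
      have hck : ((k + 1 : Nat) : Int) = (k : Int) + 1 := by push_cast; ring
      refine ⟨by positivity, by omega, ?_, ?_⟩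
      · have : xs.countP (fun x => decide ((k : Int) + 1 < x) && decide (x ≤ ((k + 1 : Nat) : Int))) = 0 := by
          rw [List.countP_eq_zero]
          intro x _
          simp only [Bool.and_eq_true, decide_eq_true_eq, not_and]
          rw [hck]
          intro h1 h2
          omega
        omega
      · have := pv_countP_succ (fun x => decide ((k : Int) + 1 ≤ x)) (k : Int) (by simp) xs
        have h0 : xs.countP (fun x => decide ((k : Int) + 1 ≤ x) && decide (x ≤ (k : Int))) = 0 := by
          rw [List.countP_eq_zero]
          intro x _
          simp only [Bool.and_eq_true, decide_eq_true_eq, not_and]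
          intro h1 h2
          omega
        rw [hck, this, h0]
        omega
    · have hjge : xs.count ((k : Int) + 1) ≤ j := by omega
      rw [List.getD_append_right _ _ _ _ (by simpa using hjge)]
      rw [List.length_replicate]
      set j' : Nat := j - xs.count ((k : Int) + 1) with hj'
      have hj'lt : j' < (pvOut xs (k : Int)).length := by omega
      obtain ⟨b0, bk, blo, bhi⟩ := ih j' hj'lt
      set v : Int := (pvOut xs (k : Int)).getD j' 0 with hv
      have hck : ((k + 1 : Nat) : Int) = (k : Int) + 1 := by push_cast; ring
      refine ⟨b0, by omega, ?_, ?_⟩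
      · have := pv_countP_succ (fun x => decide (v < x)) (k : Int) (by simp; omega) xs
        rw [hck, this]
        omega
      · have := pv_countP_succ (fun x => decide (v ≤ x)) (k : Int) (by simp; omega) xs
        rw [hck, this]
        omega

theorem pv_place_step (xs B : List Int) (n mN k : Nat) (hn : xs.length = n)
    (hb : ∀ x ∈ xs, 0 ≤ x ∧ x ≤ (mN : Int)) (hBlen : B.length = n)
    (hD3 : ∀ j : Nat, j < n → 0 ≤ B.getD j 0 ∧ B.getD j 0 ≤ (mN : Int) ∧
      (pvGt xs (B.getD j 0) : Int) ≤ (j : Int) ∧ (j : Int) < (pvGe xs (B.getD j 0) : Int))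
    (hk : k < n) (arr farr : Array Int) (halen : arr.size = n) (hflen : farr.size = mN + 1)
    (hf : ∀ u : Nat, u < mN + 1 → farr.getD u 0 =
      (pvGe xs ((u : Nat) : Int) : Int) - ((xs.drop (k + 1)).count ((u : Nat) : Int) : Int))
    (harr : ∀ j : Nat, j < n → farr.getD (B.getD j 0).toNat 0 ≤ (j : Int) →
      arr.getD j 0 = B.getD j 0) :
    (pvStep3 xs (arr, farr) ((k : Nat) : Int)).1.size = n ∧
    (pvStep3 xs (arr, farr) ((k : Nat) : Int)).2.size = mN + 1 ∧
    (∀ u : Nat, u < mN + 1 → (pvStep3 xs (arr, farr) ((k : Nat) : Int)).2.getD u 0 =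
      (pvGe xs ((u : Nat) : Int) : Int) - ((xs.drop k).count ((u : Nat) : Int) : Int)) ∧
    (∀ j : Nat, j < n →
      (pvStep3 xs (arr, farr) ((k : Nat) : Int)).2.getD (B.getD j 0).toNat 0 ≤ (j : Int) →
      (pvStep3 xs (arr, farr) ((k : Nat) : Int)).1.getD j 0 = B.getD j 0) := by
  have hkx : k < xs.length := by omega
  -- the serial processed in this iteration
  have hserial : PySem.List.pyGetD xs ((k : Nat) : Int) 0 = xs[k] := by
    rw [PySem.List.pyGetD_natCast, List.getD_eq_getElem xs 0 hkx]
  set v : Int := xs[k] with hv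
  obtain ⟨hv0, hvm⟩ := hb v (List.getElem_mem hkx)
  have hvN : ((v.toNat : Nat) : Int) = v := Int.toNat_of_nonneg hv0
  have hvNlt : v.toNat < mN + 1 := by omega
  -- the frequency cell read in this iteration
  have hfval : pyAGetD farr v 0 = farr.getD v.toNat 0 := pv_agetD_of_nonneg farr v 0 hv0
  set cntd : Nat := (xs.drop (k + 1)).count v with hcntd
  have hfv : farr.getD v.toNat 0 = (pvGe xs v : Int) - (cntd : Int) := by
    rw [hf v.toNat hvNlt, hvN]
  -- counting facts
  have hdropk : xs.drop k = v :: xs.drop (k + 1) := List.drop_eq_getElem_cons hkx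
  have hcnt_dropk : (xs.drop k).count v = cntd + 1 := by
    rw [hdropk, List.count_cons]
    simp [hcntd]
  have hvmemtake : v ∈ xs.take (k + 1) := by
    have hlt : k < (xs.take (k + 1)).length := by
      rw [List.length_take]
      omega
    have hgt : (xs.take (k + 1))[k] = xs[k] := List.getElem_take
    rw [hv, ← hgt]
    exact List.getElem_mem hlt
  have hcnt_lt : cntd < xs.count v := by
    conv_rhs => rw [← List.take_append_drop (k + 1) xs]
    rw [List.count_append]
    have : 0 < (xs.take (k + 1)).count v := List.count_pos_iff.mpr hvmemtake
    omega
  have hgev : pvGe xs v = pvGt xs v + xs.count v := pv_ge_eq_gt_add_count xs v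
  have hgele : pvGe xs v ≤ n := by
    rw [← hn]
    exact List.countP_le_length
  -- the write position
  set p : Int := farr.getD v.toNat 0 - 1 with hp
  have hp0 : 0 ≤ p := by rw [hp, hfv]; omega
  have hplt : p < (n : Int) := by rw [hp, hfv]; push_cast; omega
  have hpN : ((p.toNat : Nat) : Int) = p := Int.toNat_of_nonneg hp0
  have hpNn : p.toNat < n := by omega
  -- position bounds inside v's block
  have hpval : (p.toNat : Int) = (pvGe xs v : Int) - (cntd : Int) - 1 := by
    rw [hpN, hp, hfv]
  have hplo : pvGt xs v ≤ p.toNat := by omega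
  have hphi : p.toNat < pvGe xs v := by omega
  -- B holds v at position p
  have hBp : B.getD p.toNat 0 = v := by
    obtain ⟨hw0, hwm, hwlo, hwhi⟩ := hD3 p.toNat hpNn
    exact pv_block_unique xs (B.getD p.toNat 0) v p.toNat (by omega) (by omega) hplo hphi
  -- the stepped state, explicitly
  have hstep : pvStep3 xs (arr, farr) ((k : Nat) : Int) =
      (arr.setIfInBounds p.toNat v, farr.setIfInBounds v.toNat (farr.getD v.toNat 0 - 1)) := by
    show (pyASetD arr _ _, pyASetD farr _ _) = _
    rw [hserial, hfval]
    rw [pv_asetD_of_nonneg _ _ _ hp0, pv_asetD_of_nonneg _ _ _ hv0]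
  rw [hstep]
  refine ⟨by simp [halen], by simp [hflen], ?_, ?_⟩
  · -- frequency invariant advanced by one element
    intro u hu
    have hulen : u < farr.size := by omega
    rw [pv_aset_getD farr v.toNat _ u hulen]
    by_cases huv : v.toNat = u
    · rw [if_pos huv, hfv]
      have huvv : ((u : Nat) : Int) = v := by rw [← huv, hvN]
      rw [huvv, hcnt_dropk]
      push_cast
      ring
    · rw [if_neg huv, hf u hu, hdropk, List.count_cons]
      have : ¬ (v == ((u : Nat) : Int)) = true := by
        simp only [beq_iff_eq]
        intro hvu
        exact huv (by omega)
      simp [this]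
  · -- array invariant advanced by one element
    intro j hj hcond
    have hjlen : j < arr.size := by omega
    rw [pv_aset_getD arr p.toNat v j hjlen]
    by_cases hjp : p.toNat = j
    · rw [if_pos hjp, ← hjp, hBp]
    · rw [if_neg hjp]
      obtain ⟨hw0, hwm, hwlo, hwhi⟩ := hD3 j hj
      set w : Int := B.getD j 0 with hw
      have hwN : ((w.toNat : Nat) : Int) = w := Int.toNat_of_nonneg hw0
      have hwlen : w.toNat < farr.size := by omega
      rw [pv_aset_getD farr v.toNat _ w.toNat hwlen] at hcond
      by_cases hwv : v.toNat = w.toNat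
      · rw [if_pos hwv] at hcond
        have hjne : (j : Int) ≠ p := by
          intro he
          exact hjp (by omega)
        refine harr j hj ?_
        have hweq : w.toNat = v.toNat := hwv.symm
        rw [hweq]
        rw [hfv] at hcond ⊢
        rw [hp, hfv] at hjne
        omega
      · rw [if_neg hwv] at hcond
        exact harr j hj hcond

theorem pv_place (xs B : List Int) (n mN : Nat) (hn : xs.length = n)
    (hb : ∀ x ∈ xs, 0 ≤ x ∧ x ≤ (mN : Int)) (hBlen : B.length = n)
    (hD3 : ∀ j : Nat, j < n → 0 ≤ B.getD j 0 ∧ B.getD j 0 ≤ (mN : Int) ∧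
      (pvGt xs (B.getD j 0) : Int) ≤ (j : Int) ∧ (j : Int) < (pvGe xs (B.getD j 0) : Int)) :
    ∀ (k : Nat), k < n → ∀ (arr farr : Array Int), arr.size = n → farr.size = mN + 1 →
    (∀ u : Nat, u < mN + 1 → farr.getD u 0 =
      (pvGe xs ((u : Nat) : Int) : Int) - ((xs.drop (k + 1)).count ((u : Nat) : Int) : Int)) →
    (∀ j : Nat, j < n → farr.getD (B.getD j 0).toNat 0 ≤ (j : Int) →
      arr.getD j 0 = B.getD j 0) →
    ∀ j : Nat, j < n →
      (((PySem.List.pyRange (k : Int) (-1) (-1)).foldl (pvStep3 xs) (arr, farr)).1).getD j 0 =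
        B.getD j 0 := by
  intro k
  induction k with
  | zero =>
    intro hk arr farr halen hflen hf harr j hj
    rw [PySem.List.pyRange_neg_one_cons (by omega), PySem.List.pyRange_neg_one_eq_nil (by omega)]
    simp only [List.foldl_cons, List.foldl_nil]
    obtain ⟨h1, h2, h3, h4⟩ := pv_place_step xs B n mN 0 hn hb hBlen hD3 hk arr farr halen hflen hf harr
    refine h4 j hj ?_
    obtain ⟨hw0, hwm, hwlo, hwhi⟩ := hD3 j hj
    set w : Int := B.getD j 0 with hw
    have hwN : ((w.toNat : Nat) : Int) = w := Int.toNat_of_nonneg hw0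
    have hwlt : w.toNat < mN + 1 := by omega
    rw [h3 w.toNat hwlt, hwN, List.drop_zero]
    have := pv_ge_eq_gt_add_count xs w
    have hcge : xs.count w ≤ pvGe xs w := by omega
    push_cast
    omega
  | succ k ih =>
    intro hk arr farr halen hflen hf harr j hj
    rw [PySem.List.pyRange_neg_one_cons (by push_cast; omega)]
    rw [List.foldl_cons]
    rw [show ((k + 1 : Nat) : Int) - 1 = ((k : Nat) : Int) by push_cast; ring]
    obtain ⟨h1, h2, h3, h4⟩ :=
      pv_place_step xs B n mN (k + 1) hn hb hBlen hD3 hk arr farr halen hflen hf harr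
    have hst : (PySem.List.pyRange ((k : Nat) : Int) (-1) (-1)).foldl (pvStep3 xs)
        (pvStep3 xs (arr, farr) ((k + 1 : Nat) : Int)) =
        (PySem.List.pyRange ((k : Nat) : Int) (-1) (-1)).foldl (pvStep3 xs)
        ((pvStep3 xs (arr, farr) ((k + 1 : Nat) : Int)).1,
         (pvStep3 xs (arr, farr) ((k + 1 : Nat) : Int)).2) := by rfl
    rw [hst]
    exact ih (by omega) _ _ h1 h2 h3 h4 j hj

theorem pv_A_eq (xs : List Int) (hnil : ¬ xs = []) (m : Int)
    (hmax : PySem.List.max? xs (fun x => x) = some m) :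
    count_sort_inverse xs =
      ((PySem.List.pyRange ((xs.length : Int) - 1) (-1) (-1)).foldl (pvStep3 xs)
        (Array.replicate ((xs.length : Int)).toNat 0,
         (PySem.List.pyRange (m - 1) (-1) (-1)).foldl pvStep2
           (xs.foldl pvStep1 (Array.replicate (m + 1).toNat 0)))).1.toList := by
  unfold count_sort_inverse
  rw [if_neg hnil, PySem.List.len_eq, hmax]
  rfl

theorem pv_B_eq (xs : List Int) (hnil : ¬ xs = []) (m : Int)
    (hmax : PySem.List.max? xs (fun x => x) = some m) :
    count_sort_inverse_alt xs =
      (PySem.List.pyRange m (-1) (-1)).foldl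
        (fun result x => result ++ List.replicate
          (pyAGetD (xs.foldl pvStep1 (Array.replicate (m + 1).toNat 0)) x 0).toNat x) [] := by
  unfold count_sort_inverse_alt
  rw [if_neg hnil, hmax]
  rfl

theorem pv_main (xs : List Int) (hpre : ∀ x ∈ xs, 0 ≤ x) :
    count_sort_inverse xs = count_sort_inverse_alt xs := by
  by_cases hnil : xs = []
  · rw [hnil]; rfl
  · obtain ⟨m, hmax⟩ : ∃ m, PySem.List.max? xs (fun x => x) = some m := by
      cases hcase : PySem.List.max? xs (fun x => x) with
      | none => exact absurd ((PySem.List.max?_eq_none_iff xs _).mp hcase) hnil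
      | some m => exact ⟨m, rfl⟩
    have hm_mem : m ∈ xs := PySem.List.max?_mem hmax
    have hm0 : 0 ≤ m := hpre m hm_mem
    have hle : ∀ x ∈ xs, x ≤ m := PySem.List.max?_id_le hmax
    set mN : Nat := m.toNat with hmNdef
    have hmN : ((mN : Nat) : Int) = m := Int.toNat_of_nonneg hm0
    set n : Nat := xs.length with hndef
    have hn1 : 1 ≤ n := by
      rw [hndef]
      exact List.length_pos_iff.mpr hnil
    have hb : ∀ x ∈ xs, 0 ≤ x ∧ x ≤ (mN : Int) := by
      intro x hx
      exact ⟨hpre x hx, by rw [hmN]; exact hle x hx⟩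
    -- the shared frequency array
    set F : Array Int := xs.foldl pvStep1 (Array.replicate (m + 1).toNat 0) with hFdef
    have hrep : (m + 1).toNat = mN + 1 := by omega
    have hFlen : F.size = mN + 1 := by
      rw [hFdef, pv_foldl1_length, hrep, Array.size_replicate]
    have hF : ∀ u : Nat, u < mN + 1 → F.getD u 0 = (xs.count ((u : Nat) : Int) : Int) := by
      intro u hu
      have hrepget : (Array.replicate (m + 1).toNat (0 : Int)).getD u 0 = 0 :=
        pv_arep_getD _ u (by omega)
      rw [hFdef, pv_freq_getD xs _ ?_ u ?_, hrepget]
      · ring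
      · intro x hx
        obtain ⟨h1, h2⟩ := hb x hx
        refine ⟨h1, ?_⟩
        rw [Array.size_replicate, hrep]
        push_cast
        omega
      · rw [Array.size_replicate, hrep]
        omega
    -- the suffix-summed array
    set G : Array Int := (PySem.List.pyRange (m - 1) (-1) (-1)).foldl pvStep2 F with hGdef
    have hGlen : G.size = mN + 1 := by rw [hGdef, pv_foldl2_length, hFlen]
    have hG : ∀ u : Nat, u < mN + 1 → G.getD u 0 = ((pvGe xs ((u : Nat) : Int) : Nat) : Int) := by
      intro u hu
      by_cases hm1 : mN = 0
      · have hunil : PySem.List.pyRange (m - 1) (-1) (-1) = [] :=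
          PySem.List.pyRange_neg_one_eq_nil (by omega)
        rw [hGdef, hunil, List.foldl_nil]
        have hu0 : u = 0 := by omega
        subst hu0
        rw [hF 0 hu]
        have h2 := pv_sum_counts mN xs hb 0 (by omega)
        rw [hm1] at h2
        norm_num [Finset.sum_range_one] at h2 ⊢
        exact h2
      · have hm1' : 1 ≤ mN := by omega
        have hcast : m - 1 = (((mN - 1 : Nat) : Nat) : Int) := by push_cast; omega
        rw [hGdef, hcast, pv_suffix_getD (mN - 1) F (by omega) u (by omega)]
        by_cases huk : u ≤ mN - 1
        · rw [if_pos huk]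
          have hL : mN - 1 + 2 - u = mN + 1 - u := by omega
          rw [hL]
          have hterm : ∀ t ∈ Finset.range (mN + 1 - u), F.getD (u + t) 0 =
              (xs.count ((u : Int) + (t : Int)) : Int) := by
            intro t ht
            simp only [Finset.mem_range] at ht
            rw [hF (u + t) (by omega)]
            push_cast
            ring_nf
          rw [Finset.sum_congr rfl hterm, pv_sum_counts mN xs hb u (by omega)]
        · have hu' : u = mN := by omega
          subst hu'
          rw [if_neg huk, hF mN hu]
          have h2 := pv_sum_counts mN xs hb mN (le_refl mN)
          have h1 : mN + 1 - mN = 1 := by omega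
          rw [h1, Finset.sum_range_one] at h2
          rw [← h2]
          norm_num
    -- B in block form
    have hBout : count_sort_inverse_alt xs = pvOut xs ((mN : Nat) : Int) := by
      rw [pv_B_eq xs hnil m hmax, PySem.List.foldl_append_eq_flatMap, List.nil_append]
      rw [pvOut, hmN]
      have : ∀ x ∈ PySem.List.pyRange m (-1) (-1),
          List.replicate (pyAGetD (xs.foldl pvStep1 (Array.replicate (m + 1).toNat 0)) x 0).toNat x =
            List.replicate (xs.count x) x := by
        intro x hx
        rw [PySem.List.mem_pyRange_neg_one] at hx
        have hx0 : 0 ≤ x := by omega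
        have hxN : ((x.toNat : Nat) : Int) = x := Int.toNat_of_nonneg hx0
        have hfx : pyAGetD (xs.foldl pvStep1 (Array.replicate (m + 1).toNat 0)) x 0 =
            (xs.count x : Int) := by
          conv_lhs => rw [← hxN]
          rw [pv_agetD_natCast, ← hFdef]
          rw [hF x.toNat (by omega), hxN]
        rw [hfx, Int.toNat_natCast]
      exact List.flatMap_congr this
    set B : List Int := pvOut xs ((mN : Nat) : Int) with hBdef
    have hBlen : B.length = n := by
      rw [hBdef, pv_out_length xs mN]
      have : xs.countP (fun x => decide (0 ≤ x) && decide (x ≤ ((mN : Nat) : Int))) =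
          xs.countP (fun _ => true) := by
        refine List.countP_congr ?_
        intro x hx
        obtain ⟨h1, h2⟩ := hb x hx
        simp [h1, h2]
      rw [this, List.countP_true, hndef]
    have hD3 : ∀ j : Nat, j < n → 0 ≤ B.getD j 0 ∧ B.getD j 0 ≤ (mN : Int) ∧
        (pvGt xs (B.getD j 0) : Int) ≤ (j : Int) ∧ (j : Int) < (pvGe xs (B.getD j 0) : Int) := by
      intro j hj
      obtain ⟨h0, hk, hlo, hhi⟩ := pv_out_bounds xs mN j (by rw [← hBdef, hBlen]; omega)
      rw [← hBdef] at h0 hk hlo hhi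
      set w : Int := B.getD j 0 with hw
      have hgt : xs.countP (fun x => decide (w < x) && decide (x ≤ ((mN : Nat) : Int))) = pvGt xs w := by
        refine List.countP_congr ?_
        intro x hx
        obtain ⟨h1, h2⟩ := hb x hx
        simp [h2]
      have hge : xs.countP (fun x => decide (w ≤ x) && decide (x ≤ ((mN : Nat) : Int))) = pvGe xs w := by
        refine List.countP_congr ?_
        intro x hx
        obtain ⟨h1, h2⟩ := hb x hx
        simp [h2]
      rw [hgt] at hlo
      rw [hge] at hhi
      exact ⟨h0, hk, by exact_mod_cast hlo, by exact_mod_cast hhi⟩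
    -- apply the placement-loop invariant
    have hplace := pv_place xs B n mN hndef.symm hb hBlen hD3 (n - 1) (by omega)
      (Array.replicate ((xs.length : Int)).toNat 0) G
      (by rw [Array.size_replicate, Int.toNat_natCast, hndef])
      hGlen
      (by
        intro u hu
        rw [hG u hu]
        have hdrop : xs.drop ((n - 1) + 1) = [] := by
          rw [show (n - 1) + 1 = n by omega, hndef, List.drop_length]
        rw [hdrop]
        simp)
      (by
        intro j hj hcond
        exfalso
        obtain ⟨h0, hk, hlo, hhi⟩ := hD3 j hj
        have hwlt : (B.getD j 0).toNat < mN + 1 := by omega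
        rw [hG _ hwlt, Int.toNat_of_nonneg h0] at hcond
        omega)
    -- assemble the final equality
    rw [pv_A_eq xs hnil m hmax, hBout, ← hFdef, ← hGdef]
    have hcast : ((xs.length : Int)) - 1 = (((n - 1 : Nat) : Nat) : Int) := by
      rw [hndef]
      push_cast
      omega
    rw [hcast]
    set res := (PySem.List.pyRange (((n - 1 : Nat) : Nat) : Int) (-1) (-1)).foldl (pvStep3 xs)
      (Array.replicate ((xs.length : Int)).toNat 0, G) with hres
    have hreslen : res.1.size = n := by
      rw [hres, (pv_foldl3_length xs _ _).1, Array.size_replicate, Int.toNat_natCast, hndef]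
    refine List.ext_getElem (by rw [Array.length_toList, hreslen, hBlen]) ?_
    intro j hj1 hj2
    have hjn : j < n := by rw [← hreslen, ← Array.length_toList]; exact hj1
    have hpl := hplace j hjn
    have hjs : j < res.1.size := by omega
    rw [pv_aget_eq res.1 j 0 hjs, ← Array.getElem_toList hjs] at hpl
    rw [List.getD_eq_getElem B 0 hj2] at hpl
    exact hpl

-- ===== VERDICT =====
theorem count_sort_inverse_spec : Claim_equal_count_sort_inverse := by
  unfold Claim_equal_count_sort_inverse Spec_count_sort_inverse Pre_count_sort_inverse
  intro xs _ hpre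
  refine pv_main xs ?_
  intro x hx
  simpa using (List.all_eq_true.mp hpre x hx)
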